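-- pv_equiv track=rewrite | github.com/JaspervdA/adventofcode | 2023/day12.py | getFeasibleSpringGroups
-- ===== SOURCE A (Python) =====
-- def springGroupLength(spring_counts):
--     length = []
--     cumsum = 0
--     for idx, s in enumerate(spring_counts):
--         cumsum += s + idx
--         length.append(cumsum)
--
--     return length
--
-- def getFeasibleSpringGroups(spring_groups, question_len):
--     feasible_spring_groups_id = 0
--     for spring_idx, spring_length in enumerate(springGroupLength(spring_groups)):
--         # Bij deze opties moeten we nog van links naar rechts gaan kijken en spring counts weggooien
--         if spring_length > question_len:
--             #Not feasible, stop the loop.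
--             break
--         else:
--             feasible_spring_groups_id = spring_idx + 1
--
--     return spring_groups[0:feasible_spring_groups_id]
-- ===== SOURCE B (Python) =====
-- def getFeasibleSpringGroups(spring_groups, question_len):
--     # Single fused pass: keep a running total of s + idx and emit elements
--     # directly until the total exceeds the budget; no intermediate
--     # prefix-length list and no final slice.
--     feasible = []
--     total = 0
--     for idx, s in enumerate(spring_groups):
--         total += s + idx
--         if total > question_len:
--             break
--         feasible.append(s)
--     return feasible
-- ===== Notes on version B (the rewrite author's own statement) =====
-- stated objective: simpler
-- what changed: A builds the full prefix-length list in a helper, then scans it with an index accumulator and finally slices the input; B is one fused pass that keeps a running total and appends each element directly until the budget is exceeded, with no intermediate list and no slice.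
import Mathlib
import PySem

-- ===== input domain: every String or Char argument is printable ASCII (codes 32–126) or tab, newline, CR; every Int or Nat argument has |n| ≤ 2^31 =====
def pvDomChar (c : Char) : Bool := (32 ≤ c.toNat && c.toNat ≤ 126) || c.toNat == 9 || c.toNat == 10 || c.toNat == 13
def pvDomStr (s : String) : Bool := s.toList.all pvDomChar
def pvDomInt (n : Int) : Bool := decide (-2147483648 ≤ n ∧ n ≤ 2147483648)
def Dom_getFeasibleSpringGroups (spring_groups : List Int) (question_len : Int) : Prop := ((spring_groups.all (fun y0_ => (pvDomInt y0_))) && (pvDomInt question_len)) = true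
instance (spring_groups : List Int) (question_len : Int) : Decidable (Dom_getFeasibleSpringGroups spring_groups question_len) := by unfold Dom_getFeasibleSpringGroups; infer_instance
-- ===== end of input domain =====

-- B replaces A's build-prefix-list + scan + slice with one fused pass that emits elements until the running total exceeds the budget (simpler; same return value everywhere).


-- ===== PORT A =====
-- helper springGroupLength: the enumerate loop accumulating cumsum and appending
def sglAux (xs : List Int) (idx cumsum : Int) : List Int :=
  match xs with
  | [] => []
  | s :: rest =>
    let c := cumsum + (s + idx)
    c :: sglAux rest (idx + 1) c

def springGroupLength (spring_counts : List Int) : List Int :=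
  sglAux spring_counts 0 0

-- A's main loop over enumerate(springGroupLength(...)) with break
def aLoop (q : Int) (ls : List Int) (idx acc : Int) : Int :=
  match ls with
  | [] => acc
  | l :: rest => if l > q then acc else aLoop q rest (idx + 1) (idx + 1)

def getFeasibleSpringGroups (spring_groups : List Int) (question_len : Int) : List Int :=
  let feasible_spring_groups_id := aLoop question_len (springGroupLength spring_groups) 0 0
  PySem.List.slice spring_groups (some 0) (some feasible_spring_groups_id)

-- ===== PORT B =====
-- single fused pass: running total, emit elements until the budget is exceeded
def altAux (q : Int) (xs : List Int) (idx total : Int) : List Int :=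
  match xs with
  | [] => []
  | s :: rest =>
    let t := total + (s + idx)
    if t > q then [] else s :: altAux q rest (idx + 1) t

def getFeasibleSpringGroups_alt (spring_groups : List Int) (question_len : Int) : List Int :=
  altAux question_len spring_groups 0 0

-- ===== PRECONDITION & SPEC =====
def Spec_getFeasibleSpringGroups (spring_groups : List Int) (question_len : Int) (out : List Int) : Prop := out = getFeasibleSpringGroups_alt spring_groups question_len
instance (spring_groups : List Int) (question_len : Int) (out : List Int) : Decidable (Spec_getFeasibleSpringGroups spring_groups question_len out) := by unfold Spec_getFeasibleSpringGroups; infer_instance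

-- ===== CLAIM (what is proved, stated in full; the proofs are below) =====
def Claim_equal_getFeasibleSpringGroups : Prop := ∀ (spring_groups : List Int) (question_len : Int), Dom_getFeasibleSpringGroups spring_groups question_len → Spec_getFeasibleSpringGroups spring_groups question_len (getFeasibleSpringGroups spring_groups question_len)

-- ===== LEMMAS AND PROOFS =====

-- proof-only helper: the number of prefix elements A's loop accepts
def cnt (q : Int) (xs : List Int) (idx cumsum : Int) : Nat :=
  match xs with
  | [] => 0
  | s :: rest =>
    let c := cumsum + (s + idx)
    if c > q then 0 else cnt q rest (idx + 1) c + 1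

lemma aLoop_sglAux (q : Int) : ∀ (xs : List Int) (i c : Int),
    aLoop q (sglAux xs i c) i i = i + (cnt q xs i c : Int) := by
  intro xs
  induction xs with
  | nil => intro i c; simp [sglAux, aLoop, cnt]
  | cons s rest ih =>
    intro i c
    simp only [sglAux, aLoop, cnt]
    split_ifs with h
    · simp
    · rw [ih]
      push_cast
      ring

lemma take_cnt (q : Int) : ∀ (xs : List Int) (i c : Int),
    xs.take (cnt q xs i c) = altAux q xs i c := by
  intro xs
  induction xs with
  | nil => intro i c; simp [cnt, altAux]
  | cons s rest ih =>
    intro i c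
    simp only [cnt, altAux]
    split_ifs with h
    · simp
    · simp [List.take_succ_cons, ih]

-- ===== VERDICT (by name: the statement is the Claim_ definition above) =====
theorem getFeasibleSpringGroups_spec : Claim_equal_getFeasibleSpringGroups := by
  intro sg q _
  show getFeasibleSpringGroups sg q = getFeasibleSpringGroups_alt sg q
  unfold getFeasibleSpringGroups getFeasibleSpringGroups_alt springGroupLength
  rw [aLoop_sglAux]
  rw [PySem.List.slice_zero_start]
  rw [zero_add, PySem.List.slice_to_natCast]
  exact take_cnt q sg 0 0
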